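-- pv_equiv track=rewrite | github.com/arunb-lab/2026streak | project/dsa_pack/patterns/two_pointers.py | pair_sum_sorted
-- ===== SOURCE A (Python) =====
-- from typing import List, Optional, Tuple
--
-- def pair_sum_sorted(nums: List[int], target: int) -> Optional[Tuple[int, int]]:
--     """Return indices (i, j) such that nums[i] + nums[j] == target.
--
--     Assumes nums is sorted (non-decreasing). Returns None if no pair exists.
--
--     Time: O(n)
--     Space: O(1)
--     """
--
--     i, j = 0, len(nums) - 1
--     while i < j:
--         s = nums[i] + nums[j]
--         if s == target:
--             return i, j
--         if s < target:
--             i += 1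
--         else:
--             j -= 1
--     return None
-- ===== SOURCE B (Python) =====
-- from typing import List, Optional, Tuple
--
-- def pair_sum_sorted(nums: List[int], target: int) -> Optional[Tuple[int, int]]:
--     """Return indices (i, j) with nums[i] + nums[j] == target, or None.
--
--     Hash-map version: one pass records each value's last index, a second
--     pass looks each element's complement up.
--     """
--     last = {}
--     for i, v in enumerate(nums):
--         last[v] = i
--     for i, v in enumerate(nums):
--         j = last.get(target - v)
--         if j is not None and j > i:
--             return (i, j)
--     return None
-- ===== Notes on version B (the rewrite author's own statement) =====
-- stated objective: idiomatic
-- what changed: Replaces the two-pointer walk with the standard hash-map pattern: one pass records each value's last index in a dict, a second pass looks up the complement of each element and returns the first index whose complement sits strictly later.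
-- outside the precondition, e.g. on pair_sum_sorted([2, 5, 1, 3], 4): A returns None, B returns (2, 3)
import Mathlib
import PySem

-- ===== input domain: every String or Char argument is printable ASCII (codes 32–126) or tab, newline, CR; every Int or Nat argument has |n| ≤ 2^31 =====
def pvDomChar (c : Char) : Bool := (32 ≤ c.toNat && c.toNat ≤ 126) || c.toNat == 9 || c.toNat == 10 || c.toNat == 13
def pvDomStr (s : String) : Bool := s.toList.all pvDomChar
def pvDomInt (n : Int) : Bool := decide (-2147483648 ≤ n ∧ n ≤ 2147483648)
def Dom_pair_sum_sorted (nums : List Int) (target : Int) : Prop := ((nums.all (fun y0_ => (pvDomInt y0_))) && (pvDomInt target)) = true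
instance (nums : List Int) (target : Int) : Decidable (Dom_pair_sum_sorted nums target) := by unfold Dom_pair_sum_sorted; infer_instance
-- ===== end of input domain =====

-- B replaces A's two-pointer walk by the idiomatic complement-lookup dict (value -> last index);
-- the return values agree on sorted input (Pre_); same O(n) cost.


-- ===== PORT A =====
-- A's while-loop: i moves right, j moves left (IndexError → none; unreachable from the entry
-- call).  fuel is only a totality guard: the loop runs at most nums.length times, so the
-- fuel-0 branch is never reached from the entry call below.
def pairLoopA (nums : List Int) (target : Int) : Nat → Int → Int → Option (Int × Int)
  | 0, _, _ => none
  | fuel + 1, i, j =>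
    if i < j then
      match PySem.List.pyGet? nums i, PySem.List.pyGet? nums j with
      | some a, some b =>
          if a + b = target then some (i, j)
          else if a + b < target then pairLoopA nums target fuel (i + 1) j
          else pairLoopA nums target fuel i (j - 1)
      | _, _ => none
    else none

def pair_sum_sorted (nums : List Int) (target : Int) : Option (Int × Int) :=
  pairLoopA nums target nums.length 0 (nums.length - 1)

-- ===== PORT B =====
-- B's first pass: dict value ↦ last index
def buildLast (nums : List Int) : PySem.Dict Int Int :=
  (PySem.List.enumerate nums 0).foldl (fun d p => d.insert p.2 p.1) PySem.Dict.empty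

-- B's second pass: first index whose complement's stored index is strictly later
def scanB (last : PySem.Dict Int Int) (target : Int) : List (Int × Int) → Option (Int × Int)
  | [] => none
  | p :: rest =>
      match last.get? (target - p.2) with
      | some j => if j > p.1 then some (p.1, j) else scanB last target rest
      | none => scanB last target rest

def pair_sum_sorted_alt (nums : List Int) (target : Int) : Option (Int × Int) :=
  scanB (buildLast nums) target (PySem.List.enumerate nums 0)

-- ===== PRECONDITION & SPEC =====
-- Pre_ admits sorted lists and, besides, any list in which no pair sums to target (there both
-- programs return none).  It excludes only unsorted lists containing a pair that sums to target:
-- A's docstring assumes nums is sorted non-decreasing, and on such inputs the value A returns is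
-- an artefact of the two-pointer walk that no caller may rely on.
def Pre_pair_sum_sorted (nums : List Int) (target : Int) : Prop :=
  nums.Pairwise (· ≤ ·) ∨ nums.Pairwise (fun x y => x + y ≠ target)
instance (nums : List Int) (target : Int) : Decidable (Pre_pair_sum_sorted nums target) := by
  unfold Pre_pair_sum_sorted; infer_instance

def pvWitness_pair_sum_sorted : List Int × Int := ([1, 2, 3], 5)

def Spec_pair_sum_sorted (nums : List Int) (target : Int) (out : Option (Int × Int)) : Prop := out = pair_sum_sorted_alt nums target
instance (nums : List Int) (target : Int) (out : Option (Int × Int)) : Decidable (Spec_pair_sum_sorted nums target out) := by unfold Spec_pair_sum_sorted; infer_instance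

-- ===== CLAIM (what is proved, stated in full; the proofs are below) =====
def Claim_equal_pair_sum_sorted : Prop := ∀ (nums : List Int) (target : Int), Dom_pair_sum_sorted nums target → Pre_pair_sum_sorted nums target → Spec_pair_sum_sorted nums target (pair_sum_sorted nums target)

-- ===== LEMMAS AND PROOFS =====

lemma buildLast_append (xs : List Int) (a : Int) :
    buildLast (xs ++ [a]) = (buildLast xs).insert a (xs.length : Int) := by
  unfold buildLast
  rw [PySem.List.enumerate_append, List.foldl_append]
  simp [PySem.List.enumerate_cons, PySem.List.enumerate_nil]

-- the dict built by B's first pass holds exactly each value's LAST index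
lemma buildLast_get?_some (nums : List Int) (x j : Int) :
    (buildLast nums).get? x = some j ↔
      ∃ k : Nat, j = (k : Int) ∧ nums[k]? = some x ∧ ∀ m : Nat, k < m → nums[m]? ≠ some x := by
  induction nums using List.reverseRecOn generalizing j with
  | nil =>
      simp [buildLast, PySem.List.enumerate_nil, PySem.Dict.get?_empty]
  | append_singleton xs a ih =>
      rw [buildLast_append, PySem.Dict.get?_insert]
      by_cases hx : x = a
      · subst hx
        rw [if_pos rfl]
        simp only [Option.some.injEq]
        constructor
        · rintro rfl
          refine ⟨xs.length, rfl, by simp, ?_⟩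
          intro m hm
          rw [List.getElem?_eq_none (by simp; omega)]
          simp
        · rintro ⟨k, rfl, hk, hmax⟩
          have hklen : k < xs.length + 1 := by
            have := List.getElem?_eq_some_iff.mp hk
            simpa using this.1
          have : ¬ k < xs.length := by
            intro hlt
            exact hmax xs.length hlt (by simp)
          have : k = xs.length := by omega
          simp [this]
      · rw [if_neg hx, ih]
        constructor
        · rintro ⟨k, rfl, hk, hmax⟩
          have hklen : k < xs.length := (List.getElem?_eq_some_iff.mp hk).1
          refine ⟨k, rfl, ?_, ?_⟩
          · rw [List.getElem?_append_left hklen]; exact hk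
          · intro m hm
            by_cases hmlen : m < xs.length
            · rw [List.getElem?_append_left hmlen]
              exact hmax m hm
            · by_cases hme : m = xs.length
              · subst hme
                rw [List.getElem?_append_right (le_refl _)]
                simp
                exact fun h => hx h.symm
              · rw [List.getElem?_eq_none (by simp; omega)]
                simp
        · rintro ⟨k, rfl, hk, hmax⟩
          have hklen : k < xs.length + 1 := by
            have := List.getElem?_eq_some_iff.mp hk
            simpa using this.1
          have hkx : k ≠ xs.length := by
            intro h
            subst h
            rw [List.getElem?_append_right (le_refl _)] at hk
            simp at hk
            exact hx hk.symm
          have hklt : k < xs.length := by omega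
          refine ⟨k, rfl, ?_, ?_⟩
          · rw [List.getElem?_append_left hklt] at hk; exact hk
          · intro m hm hmx
            have hmlen : m < xs.length := (List.getElem?_eq_some_iff.mp hmx).1
            exact hmax m hm (by rw [List.getElem?_append_left hmlen]; exact hmx)

lemma scanB_none (last : PySem.Dict Int Int) (target : Int) (l : List (Int × Int))
    (h : ∀ p ∈ l, ∀ j, last.get? (target - p.2) = some j → ¬ (j > p.1)) :
    scanB last target l = none := by
  induction l with
  | nil => rfl
  | cons p rest ih =>
      rcases h0 : last.get? (target - p.2) with _ | j
      · simp only [scanB, h0]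
        exact ih (fun q hq => h q (List.mem_cons_of_mem _ hq))
      · have hnot := h p (List.mem_cons_self) j h0
        simp only [scanB, h0, if_neg hnot]
        exact ih (fun q hq => h q (List.mem_cons_of_mem _ hq))

lemma scanB_found (last : PySem.Dict Int Int) (target : Int) (l₁ l₂ : List (Int × Int))
    (p : Int × Int) (j : Int)
    (h₁ : ∀ q ∈ l₁, ∀ j', last.get? (target - q.2) = some j' → ¬ (j' > q.1))
    (h2 : last.get? (target - p.2) = some j) (h3 : j > p.1) :
    scanB last target (l₁ ++ p :: l₂) = some (p.1, j) := by
  induction l₁ with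
  | nil => simp only [List.nil_append, scanB, h2, if_pos h3]
  | cons q rest ih =>
      rcases h0 : last.get? (target - q.2) with _ | j'
      · simp only [List.cons_append, scanB, h0]
        exact ih (fun r hr => h₁ r (List.mem_cons_of_mem _ hr))
      · have hnot := h₁ q (List.mem_cons_self) j' h0
        simp only [List.cons_append, scanB, h0, if_neg hnot]
        exact ih (fun r hr => h₁ r (List.mem_cons_of_mem _ hr))

lemma sorted_le (nums : List Int) (hs : nums.Pairwise (· ≤ ·)) (a b : Nat)
    (hab : a ≤ b) (hb : b < nums.length) :
    nums[a]'(by omega) ≤ nums[b]'hb := by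
  rcases Nat.lt_or_ge a b with h | h
  · exact (List.pairwise_iff_getElem.mp hs) a b (by omega) hb h
  · have : a = b := by omega
    subst this; rfl

lemma alt_none (nums : List Int) (target : Int)
    (noSol : ∀ (a b : Nat) (va vb : Int), a < b → nums[a]? = some va → nums[b]? = some vb →
        va + vb ≠ target) :
    pair_sum_sorted_alt nums target = none := by
  unfold pair_sum_sorted_alt
  apply scanB_none
  intro p hp j hget hgt
  rcases (PySem.List.mem_enumerate_iff _ _ _).mp hp with ⟨k, hk, rfl⟩
  rcases (buildLast_get?_some _ _ _).mp hget with ⟨m, rfl, hm, _⟩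
  simp only at hgt
  have hkm : k < m := by omega
  exact noSol k m (nums[k]'hk) (target - nums[k]'hk) hkm (List.getElem?_eq_getElem hk) hm
    (by ring_nf)

-- without any sortedness: if no pair sums to target, A's loop can never take its return branch
lemma loopA_none (nums : List Int) (target : Int)
    (noSol : ∀ (a b : Nat) (va vb : Int), a < b → nums[a]? = some va → nums[b]? = some vb →
        va + vb ≠ target) :
    ∀ (fuel : Nat) (i j : Int), 0 ≤ i → j < nums.length →
      pairLoopA nums target fuel i j = none := by
  intro fuel
  induction fuel with
  | zero => intro i j _ _; rfl
  | succ fuel ih =>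
      intro i j hi hj
      show (if i < j then _ else none) = _
      by_cases hij : i < j
      · have hj0 : 0 ≤ j := by omega
        have hilen' : i.toNat < nums.length := by omega
        have hjlen' : j.toNat < nums.length := by omega
        have hgi : PySem.List.pyGet? nums i = some (nums[i.toNat]'hilen') := by
          rw [PySem.List.pyGet?_of_nonneg nums hi, List.getElem?_eq_getElem hilen']
        have hgj : PySem.List.pyGet? nums j = some (nums[j.toNat]'hjlen') := by
          rw [PySem.List.pyGet?_of_nonneg nums hj0, List.getElem?_eq_getElem hjlen']
        rw [if_pos hij, hgi, hgj]
        simp only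
        have hne : ¬ nums[i.toNat]'hilen' + nums[j.toNat]'hjlen' = target :=
          noSol i.toNat j.toNat _ _ (by omega) (List.getElem?_eq_getElem hilen')
            (List.getElem?_eq_getElem hjlen') 
        rw [if_neg hne]
        by_cases hlt : nums[i.toNat]'hilen' + nums[j.toNat]'hjlen' < target
        · rw [if_pos hlt]; exact ih (i + 1) j (by omega) hj
        · rw [if_neg hlt]; exact ih i (j - 1) hi (by omega)
      · rw [if_neg hij]

-- bridge: Pairwise (x + y ≠ target) is exactly "no index pair sums to target"
lemma pairwise_noSol (nums : List Int) (target : Int)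
    (h : nums.Pairwise (fun x y => x + y ≠ target)) :
    ∀ (a b : Nat) (va vb : Int), a < b → nums[a]? = some va → nums[b]? = some vb →
      va + vb ≠ target := by
  intro a b va vb hab ha hb
  have hbl : b < nums.length := (List.getElem?_eq_some_iff.mp hb).1
  have hal : a < nums.length := by omega
  rw [List.getElem?_eq_getElem hal] at ha
  rw [List.getElem?_eq_getElem hbl] at hb
  rw [← Option.some_inj.mp ha, ← Option.some_inj.mp hb]
  exact (List.pairwise_iff_getElem.mp h) a b hal hbl hab

-- A's two-pointer loop equals B's full scan, under the loop invariant that every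
-- solution pair still lies inside the window [i, j]
lemma loopA_eq (nums : List Int) (target : Int) (hs : nums.Pairwise (· ≤ ·)) :
    ∀ d : Nat, ∀ i j : Int, 0 ≤ i → j < nums.length → (j - i).toNat ≤ d →
    (∀ (a b : Nat) (va vb : Int), a < b → nums[a]? = some va → nums[b]? = some vb →
        va + vb = target → i ≤ (a : Int) ∧ (b : Int) ≤ j) →
    pairLoopA nums target d i j = pair_sum_sorted_alt nums target := by
  intro d
  induction d with
  | zero =>
      intro i j hi hj hd hInv
      show (none : Option (Int × Int)) = _
      refine (alt_none nums target ?_).symm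
      intro a b va vb hab ha hb hsum
      have := hInv a b va vb hab ha hb hsum
      omega
  | succ d ih =>
      intro i j hi hj hd hInv
      show (if i < j then _ else none) = _
      by_cases hij : i < j
      · have hj0 : 0 ≤ j := by omega
        have hilen : i < (nums.length : Int) := by omega
        have hilen' : i.toNat < nums.length := by omega
        have hjlen' : j.toNat < nums.length := by omega
        have hgi : PySem.List.pyGet? nums i = some (nums[i.toNat]'hilen') := by
          rw [PySem.List.pyGet?_of_nonneg nums hi, List.getElem?_eq_getElem hilen']
        have hgj : PySem.List.pyGet? nums j = some (nums[j.toNat]'hjlen') := by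
          rw [PySem.List.pyGet?_of_nonneg nums hj0, List.getElem?_eq_getElem hjlen']
        rw [if_pos hij, hgi, hgj]
        simp only
        by_cases hsum : nums[i.toNat]'hilen' + nums[j.toNat]'hjlen' = target
        · rw [if_pos hsum]
          symm
          unfold pair_sum_sorted_alt
          have hsplit : nums = nums.take i.toNat ++ (nums[i.toNat]'hilen' :: nums.drop (i.toNat + 1)) := by
            rw [List.getElem_cons_drop, List.take_append_drop]
          have henum : PySem.List.enumerate nums 0 =
              PySem.List.enumerate (nums.take i.toNat) 0 ++
                (((i.toNat : Int), nums[i.toNat]'hilen') ::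
                  PySem.List.enumerate (nums.drop (i.toNat + 1)) ((i.toNat : Int) + 1)) := by
            conv_lhs => rw [hsplit]
            rw [PySem.List.enumerate_append, PySem.List.enumerate_cons]
            have hlen : (nums.take i.toNat).length = i.toNat := by
              simp [List.length_take]; omega
            rw [hlen]
            norm_num
          rw [henum]
          have hres : (i, j) = (((i.toNat : Int)), j) := by
            simp [Int.toNat_of_nonneg hi]
          rw [hres]
          apply scanB_found
          · -- no earlier index has a strictly later complement
            intro q hq j' hget hgt
            rcases (PySem.List.mem_enumerate_iff _ _ _).mp hq with ⟨k, hk, rfl⟩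
            have hklen : k < nums.length := by
              have := List.length_take_le i.toNat nums; omega
            have hkval : (nums.take i.toNat)[k]'hk = nums[k]'hklen := List.getElem_take
            rcases (buildLast_get?_some _ _ _).mp hget with ⟨m, rfl, hm, _⟩
            simp only at hgt hget
            have hkm : k < m := by omega
            rw [hkval] at hm
            have := hInv k m (nums[k]'hklen) (target - nums[k]'hklen) hkm
              (List.getElem?_eq_getElem hklen) hm (by ring)
            have hki : k < i.toNat := by
              have := hk
              simp [List.length_take] at this
              omega
            omega
          · -- the lookup at i returns exactly A's j
            apply (buildLast_get?_some _ _ _).mpr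
            refine ⟨j.toNat, (Int.toNat_of_nonneg hj0).symm, ?_, ?_⟩
            · rw [List.getElem?_eq_getElem hjlen']
              congr 1
              omega
            · intro m hm hmx
              have hmlen : m < nums.length := (List.getElem?_eq_some_iff.mp hmx).1
              have hitm : i.toNat < m := by omega
              have := hInv i.toNat m (nums[i.toNat]'hilen') (target - nums[i.toNat]'hilen')
                hitm (List.getElem?_eq_getElem hilen') hmx (by ring)
              omega
          · simp only
            omega
        · rw [if_neg hsum]
          by_cases hlt : nums[i.toNat]'hilen' + nums[j.toNat]'hjlen' < target
          · rw [if_pos hlt]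
            apply ih (i + 1) j (by omega) hj (by omega)
            intro a b va vb hab ha hb hw
            have halen : a < nums.length := (List.getElem?_eq_some_iff.mp ha).1
            have hblen : b < nums.length := (List.getElem?_eq_some_iff.mp hb).1
            obtain ⟨h1, h2⟩ := hInv a b va vb hab ha hb hw
            refine ⟨?_, h2⟩
            by_contra hcon
            have hai : a = i.toNat := by omega
            have hva : va = nums[i.toNat]'hilen' := by
              rw [hai, List.getElem?_eq_getElem hilen'] at ha
              exact (Option.some_inj.mp ha).symm
            have hvb : vb = nums[b]'hblen := by
              rw [List.getElem?_eq_getElem hblen] at hb; exact (Option.some_inj.mp hb).symm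
            have hble : b ≤ j.toNat := by omega
            have hmono := sorted_le nums hs b j.toNat hble hjlen'
            omega
          · rw [if_neg hlt]
            apply ih i (j - 1) hi (by omega) (by omega)
            intro a b va vb hab ha hb hw
            have halen : a < nums.length := (List.getElem?_eq_some_iff.mp ha).1
            have hblen : b < nums.length := (List.getElem?_eq_some_iff.mp hb).1
            obtain ⟨h1, h2⟩ := hInv a b va vb hab ha hb hw
            refine ⟨h1, ?_⟩
            by_contra hcon
            have hbj : b = j.toNat := by omega
            have hva : va = nums[a]'halen := by
              rw [List.getElem?_eq_getElem halen] at ha; exact (Option.some_inj.mp ha).symm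
            have hvb : vb = nums[j.toNat]'hjlen' := by
              rw [hbj, List.getElem?_eq_getElem hjlen'] at hb
              exact (Option.some_inj.mp hb).symm
            have hale : i.toNat ≤ a := by omega
            have hmono := sorted_le nums hs i.toNat a hale halen
            omega
      · rw [if_neg hij]
        refine (alt_none nums target ?_).symm
        intro a b va vb hab ha hb hsum
        have := hInv a b va vb hab ha hb hsum
        omega

-- ===== VERDICT (by name: the statement is the Claim_ definition above) =====
theorem pair_sum_sorted_spec : Claim_equal_pair_sum_sorted := by
  intro nums target _ hpre
  unfold Spec_pair_sum_sorted pair_sum_sorted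
  rcases hpre with hs | hns
  · refine loopA_eq nums target hs nums.length 0 (nums.length - 1)
      le_rfl (by omega) (by omega) ?_
    intro a b va vb hab ha hb hsum
    have hbl : b < nums.length := by
      rcases List.getElem?_eq_some_iff.mp hb with ⟨h, _⟩; exact h
    constructor <;> omega
  · have noSol := pairwise_noSol nums target hns
    rw [loopA_none nums target noSol nums.length 0 (nums.length - 1) le_rfl (by omega),
      alt_none nums target noSol]
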